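-- pv_equiv track=rewrite | github.com/aguinet/alphatav | recover.py | BFByte
-- ===== SOURCE A (Python) =====
-- def BFByte(KnownValue, KnownMask):
--     if KnownMask == 0xFF:
--         yield KnownValue
--         return
--     KnownValue &= KnownMask
--     for V in range(256):
--         if (V & KnownMask) != KnownValue:
--             continue
--         yield V
-- ===== SOURCE B (Python) =====
-- def BFByte(KnownValue, KnownMask):
--     # The 0xFF fully-known case yields the raw KnownValue, as given.
--     if KnownMask == 0xFF:
--         yield KnownValue
--         return
--     fixed = KnownValue & KnownMask
--     # A match V lies in range(256), so V & KnownMask fits in one unsigned byte;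
--     # if the fixed bits do not, there is no match at all.
--     if fixed < 0 or fixed > 0xFF:
--         return
--     # Build matches bit by bit: a free (unmasked) byte bit doubles the candidate
--     # set, a masked bit pins that bit to fixed's bit.  The list stays ascending.
--     vals = [0]
--     for i in range(8):
--         bit = 2 ** i
--         if KnownMask & bit:
--             if fixed & bit:
--                 vals = [v + bit for v in vals]
--         else:
--             vals = vals + [v + bit for v in vals]
--     for v in vals:
--         yield v
-- ===== Notes on version B (the rewrite author's own statement) =====
-- stated objective: faster
-- what changed: Instead of scanning all 256 byte values and filtering by V & KnownMask == KnownValue & KnownMask, B rejects out-of-byte fixed bits once and then constructs exactly the matching bytes bit-by-bit (doubling the candidate list at each free bit position), producing the same ascending list.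
import Mathlib
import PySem

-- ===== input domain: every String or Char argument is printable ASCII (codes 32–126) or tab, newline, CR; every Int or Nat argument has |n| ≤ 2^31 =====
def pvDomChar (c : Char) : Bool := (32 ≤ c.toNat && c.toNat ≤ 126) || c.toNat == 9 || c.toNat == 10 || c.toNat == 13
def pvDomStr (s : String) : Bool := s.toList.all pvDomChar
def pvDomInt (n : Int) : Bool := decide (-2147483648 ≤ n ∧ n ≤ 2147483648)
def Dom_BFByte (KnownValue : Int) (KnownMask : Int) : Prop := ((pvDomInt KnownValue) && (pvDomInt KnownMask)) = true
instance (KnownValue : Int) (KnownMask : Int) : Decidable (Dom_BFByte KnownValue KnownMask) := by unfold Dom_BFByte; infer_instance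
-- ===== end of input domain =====

-- B replaces A's scan-and-filter of all 256 byte values by a per-bit construction that
-- builds exactly the matching bytes in ascending order (objective: faster by a constant factor).

-- ===== PORT A =====
-- A (a generator) yields: KnownValue alone if the mask is 0xFF; otherwise every V in
-- range(256) with V & KnownMask == KnownValue & KnownMask.  Ported as the list of yields.
def BFByte (KnownValue : Int) (KnownMask : Int) : List Int :=
  if KnownMask = 255 then [KnownValue]
  else
    let KV := PySem.Int.band KnownValue KnownMask      -- KnownValue &= KnownMask
    (PySem.List.pyRange 0 256 1).foldl
      (fun acc V => if PySem.Int.band V KnownMask ≠ KV then acc else acc ++ [V]) []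

-- ===== PORT B =====
def BFByte_alt (KnownValue : Int) (KnownMask : Int) : List Int :=
  if KnownMask = 255 then [KnownValue]
  else
    let fixed := PySem.Int.band KnownValue KnownMask
    if fixed < 0 ∨ fixed > 255 then []
    else
      (PySem.List.pyRange 0 8 1).foldl
        (fun vals i =>
          let bit : Int := 2 ^ i.toNat    -- 2 ** i; i ∈ range(8) is nonnegative, so toNat is exact
          if PySem.Int.band KnownMask bit ≠ 0 then
            (if PySem.Int.band fixed bit ≠ 0 then vals.map (· + bit) else vals)
          else vals ++ vals.map (· + bit)) [0]

-- ===== PRECONDITION & SPEC =====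
def Spec_BFByte (KnownValue : Int) (KnownMask : Int) (out : List Int) : Prop := out = BFByte_alt KnownValue KnownMask
instance (KnownValue : Int) (KnownMask : Int) (out : List Int) : Decidable (Spec_BFByte KnownValue KnownMask out) := by unfold Spec_BFByte; infer_instance

-- ===== CLAIM (what is proved, stated in full; the proofs are below) =====
def Claim_equal_BFByte : Prop := ∀ (KnownValue : Int) (KnownMask : Int), Dom_BFByte KnownValue KnownMask → Spec_BFByte KnownValue KnownMask (BFByte KnownValue KnownMask)

-- ===== LEMMAS AND PROOFS =====

-- x &&& m and Nat.ldiff x m partition the bits of x.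
theorem pvLandAddLdiff (x : Nat) : ∀ m, (x &&& m) + Nat.ldiff x m = x := by
  induction x using Nat.binaryRec with
  | zero =>
    intro m
    have h : Nat.ldiff 0 m = 0 := Nat.eq_of_testBit_eq (by simp)
    simp [h]
  | bit b x ih =>
    intro m
    rw [← Nat.bit_testBit_zero_shiftRight_one m, Nat.land_bit, Nat.ldiff_bit]
    have := ih (m >>> 1)
    cases b <;> cases m.testBit 0 <;> simp [Nat.bit] <;> omega

theorem pvSubAnd (x m : Nat) : x - (x &&& m) = Nat.ldiff x m := by
  have h := pvLandAddLdiff x m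
  omega

theorem pvBandNatNegSucc (v n : Nat) :
    PySem.Int.band (v : Int) (Int.negSucc n) = ((Nat.ldiff v n : Nat) : Int) := by
  have h0 : ¬ (0 : Int) ≤ Int.negSucc n := by omega
  have h1 : (-(Int.negSucc n) - 1) = (n : Int) := by
    rw [Int.negSucc_eq]; ring
  rw [PySem.Int.band]
  simp [h0, h1, pvSubAnd]

theorem pvBandNegSuccNat (n v : Nat) :
    PySem.Int.band (Int.negSucc n) (v : Int) = ((Nat.ldiff v n : Nat) : Int) := by
  rw [PySem.Int.band_comm, pvBandNatNegSucc]

theorem pvBandNegSuccNegSucc (m n : Nat) :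
    PySem.Int.band (Int.negSucc m) (Int.negSucc n) = -((m ||| n : Nat) : Int) - 1 := by
  have h0 : ¬ (0 : Int) ≤ Int.negSucc m := by omega
  have h1 : ¬ (0 : Int) ≤ Int.negSucc n := by omega
  have h2 : (-(Int.negSucc m) - 1) = (m : Int) := by rw [Int.negSucc_eq]; ring
  have h3 : (-(Int.negSucc n) - 1) = (n : Int) := by rw [Int.negSucc_eq]; ring
  rw [PySem.Int.band]
  simp [h0, h1, h2, h3]

-- a Nat whose bits ≥ k are all clear is < 2^k
theorem pvLtOfHighBitsGen (k x : Nat) (h : ∀ i, k ≤ i → x.testBit i = false) : x < 2^k := by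
  refine Nat.lt_of_testBit k (h k (le_refl _)) ?_ ?_
  · simp [Nat.testBit_two_pow]
  · intro j hj
    rw [h j (by omega), Nat.testBit_two_pow]
    simp; omega

-- the bit-by-bit candidate list of B, as a Nat-level model
def pvBuild (mb fb : Nat → Bool) : Nat → List Nat
  | 0 => [0]
  | k+1 =>
    let p := pvBuild mb fb k
    if mb k then (if fb k then p.map (· + 2^k) else p) else p ++ p.map (· + 2^k)

theorem pvBuild_lt (mb fb : Nat → Bool) : ∀ k, ∀ v ∈ pvBuild mb fb k, v < 2^k := by
  intro k
  induction k with
  | zero => intro v hv; simp [pvBuild] at hv; omega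
  | succ k ih =>
    intro v hv
    have hpow : (2:Nat)^k < 2^(k+1) := by
      have h1 := Nat.two_pow_pos k
      have h2 : (2:Nat)^(k+1) = 2 * 2^k := by rw [Nat.pow_succ]; ring
      omega
    simp only [pvBuild] at hv
    split at hv
    · split at hv
      · simp at hv
        obtain ⟨w, hw, rfl⟩ := hv
        have := ih w hw
        omega
      · have := ih v hv; omega
    · simp at hv
      rcases hv with hv | hv
      · have := ih v hv; omega
      · obtain ⟨w, hw, rfl⟩ := hv
        have := ih w hw
        omega

theorem pvBuild_pairwise (mb fb : Nat → Bool) : ∀ k, (pvBuild mb fb k).Pairwise (· < ·) := by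
  intro k
  induction k with
  | zero => simp [pvBuild]
  | succ k ih =>
    simp only [pvBuild]
    have hmap : ((pvBuild mb fb k).map (· + 2^k)).Pairwise (· < ·) := by
      refine List.pairwise_map.mpr ?_
      exact ih.imp (by intro a b h; omega)
    split
    · split
      · exact hmap
      · exact ih
    · refine List.pairwise_append.mpr ⟨ih, hmap, ?_⟩
      intro a ha b hb
      have ha' := pvBuild_lt mb fb k a ha
      simp at hb
      obtain ⟨w, _, rfl⟩ := hb
      omega

theorem pvBuild_mem (mb fb : Nat → Bool) :
    ∀ k v, v ∈ pvBuild mb fb k ↔ v < 2^k ∧ ∀ j, j < k → mb j = true → v.testBit j = fb j := by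
  intro k
  induction k with
  | zero => intro v; simp [pvBuild]
  | succ k ih =>
    intro v
    have hpow : (2:Nat)^(k+1) = 2^k + 2^k := by ring
    -- bits of w + 2^k for w < 2^k
    have haddbit : ∀ w, w < 2^k → ∀ j, j ≤ k → (w + 2^k).testBit j = if j = k then true else w.testBit j := by
      intro w hw j hj
      rcases Nat.lt_or_ge j k with hjk | hjk
      · rw [Nat.add_comm, Nat.testBit_two_pow_add_gt hjk]
        simp; omega
      · have hjk' : j = k := by omega
        subst hjk'
        rw [Nat.add_comm, Nat.testBit_two_pow_add_eq]
        simp [Nat.testBit_lt_two_pow hw]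
    simp only [pvBuild]
    split
    · rename_i hmb
      split
      · rename_i hfb
        simp only [List.mem_map]
        constructor
        · rintro ⟨w, hw, rfl⟩
          obtain ⟨hwlt, hwbits⟩ := (ih w).mp hw
          refine ⟨by omega, ?_⟩
          intro j hj hmbj
          rw [haddbit w hwlt j (by omega)]
          split
          · rename_i hjeq; subst hjeq; exact hfb.symm
          · rename_i hne
            exact hwbits j (by omega) hmbj
        · rintro ⟨hvlt, hvbits⟩
          have hbitk : v.testBit k = true := by rw [hvbits k (by omega) hmb, hfb]
          have hge : 2^k ≤ v := by
            by_contra hc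
            rw [Nat.testBit_lt_two_pow (by omega)] at hbitk
            exact Bool.false_ne_true hbitk
          refine ⟨v - 2^k, (ih _).mpr ⟨by omega, ?_⟩, by omega⟩
          intro j hj hmbj
          have := haddbit (v - 2^k) (by omega) j (by omega)
          rw [Nat.sub_add_cancel hge] at this
          rw [← hvbits j (by omega) hmbj, this]
          simp; omega
      · rename_i hfb
        have hfb' : fb k = false := by simpa using hfb
        rw [ih v]
        constructor
        · rintro ⟨hvlt, hvbits⟩
          refine ⟨by omega, ?_⟩
          intro j hj hmbj
          rcases Nat.lt_or_ge j k with hjk | hjk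
          · exact hvbits j hjk hmbj
          · have hjk' : j = k := by omega
            subst hjk'
            rw [Nat.testBit_lt_two_pow hvlt, hfb']
        · rintro ⟨hvlt, hvbits⟩
          have hbitk : v.testBit k = false := by rw [hvbits k (by omega) hmb, hfb']
          have hvlt' : v < 2^k := by
            refine pvLtOfHighBitsGen k v ?_
            intro i hi
            rcases Nat.eq_or_lt_of_le hi with rfl | hlt
            · exact hbitk
            · refine Nat.testBit_lt_two_pow (lt_of_lt_of_le (show v < 2^(k+1) by omega) ?_)
              exact Nat.pow_le_pow_right (by omega) (by omega)
          exact ⟨hvlt', fun j hj hmbj => hvbits j (by omega) hmbj⟩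
    · rename_i hmb
      have hmb' : mb k = false := by simpa using hmb
      simp only [List.mem_append, List.mem_map]
      constructor
      · rintro (hv | ⟨w, hw, rfl⟩)
        · obtain ⟨hvlt, hvbits⟩ := (ih v).mp hv
          refine ⟨by omega, ?_⟩
          intro j hj hmbj
          have hjk : j < k := by
            rcases Nat.lt_or_ge j k with h | h
            · exact h
            · exact absurd hmbj (by simp [show j = k by omega, hmb'])
          exact hvbits j hjk hmbj
        · obtain ⟨hwlt, hwbits⟩ := (ih w).mp hw
          refine ⟨by omega, ?_⟩
          intro j hj hmbj
          have hjk : j < k := by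
            rcases Nat.lt_or_ge j k with h | h
            · exact h
            · exact absurd hmbj (by simp [show j = k by omega, hmb'])
          rw [haddbit w hwlt j (by omega)]
          simp [Nat.ne_of_lt hjk]
          exact hwbits j hjk hmbj
      · rintro ⟨hvlt, hvbits⟩
        by_cases hvk : v < 2^k
        · left
          exact (ih v).mpr ⟨hvk, fun j hj hmbj => hvbits j (by omega) hmbj⟩
        · right
          refine ⟨v - 2^k, (ih _).mpr ⟨by omega, ?_⟩, by omega⟩
          intro j hj hmbj
          have := haddbit (v - 2^k) (by omega) j (by omega)
          rw [Nat.sub_add_cancel (by omega)] at this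
          rw [← hvbits j (by omega) hmbj, this]
          simp; omega


-- two strictly increasing lists with the same members are equal
theorem pvSortedEq (l1 l2 : List Nat) (h1 : l1.Pairwise (· < ·)) (h2 : l2.Pairwise (· < ·))
    (h : ∀ v, v ∈ l1 ↔ v ∈ l2) : l1 = l2 := by
  have n1 : l1.Nodup := h1.imp (fun hlt => Nat.ne_of_lt hlt)
  have n2 : l2.Nodup := h2.imp (fun hlt => Nat.ne_of_lt hlt)
  exact List.Perm.eq_of_pairwise
    (fun a b _ _ hab hba => absurd hba (Nat.lt_asymm hab)) h1 h2
    ((List.perm_ext_iff_of_nodup n1 n2).mpr h)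

-- A's surviving byte values are exactly B's bit-by-bit candidates
theorem pvCore (mb : Nat → Bool) (g : Nat → Nat) (f : Nat)
    (hg : ∀ v i, (g v).testBit i = (v.testBit i && mb i))
    (hf : f < 256) (hsub : ∀ i, f.testBit i = true → mb i = true) :
    (List.range 256).filter (fun v => decide (g v = f)) = pvBuild mb (fun i => f.testBit i) 8 := by
  apply pvSortedEq
  · exact (List.pairwise_lt_range).filter _
  · exact pvBuild_pairwise _ _ 8
  · intro v
    rw [List.mem_filter, List.mem_range, pvBuild_mem]
    have h256 : (2:Nat)^8 = 256 := by norm_num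
    constructor
    · rintro ⟨hv, hgv⟩
      rw [decide_eq_true_iff] at hgv
      refine ⟨by omega, ?_⟩
      intro j hj hmbj
      have := hg v j
      rw [hgv, hmbj] at this
      simp at this
      exact this.symm
    · rintro ⟨hv, hbits⟩
      have hv' : v < 256 := by omega
      refine ⟨hv', ?_⟩
      rw [decide_eq_true_iff]
      apply Nat.eq_of_testBit_eq
      intro j
      rw [hg v j]
      by_cases hj : j < 8
      · cases hmbj : mb j with
        | true =>
          rw [hbits j hj hmbj]
          simp
        | false =>
          simp only [hmbj, Bool.and_false]
          cases hfj : f.testBit j with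
          | false => rfl
          | true => rw [hsub j hfj] at hmbj; exact absurd hmbj (by simp)
      · have hle : (2:Nat)^8 ≤ 2^j := Nat.pow_le_pow_right (by omega) (by omega)
        have hvj : v.testBit j = false :=
          Nat.testBit_lt_two_pow (lt_of_lt_of_le (by omega) hle)
        have hfj : f.testBit j = false :=
          Nat.testBit_lt_two_pow (lt_of_lt_of_le (by omega) hle)
        rw [hvj, hfj]
        simp

-- g maps bytes to bytes
theorem pvGLt (mb : Nat → Bool) (g : Nat → Nat)
    (hg : ∀ v i, (g v).testBit i = (v.testBit i && mb i)) (v : Nat) (hv : v < 256) :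
    g v < 256 := by
  have h := pvLtOfHighBitsGen 8 (g v) ?_
  · omega
  · intro i hi
    rw [hg v i]
    have h256 : (2:Nat)^8 = 256 := by norm_num
    have hle : (2:Nat)^8 ≤ 2^i := Nat.pow_le_pow_right (by omega) (by omega)
    have hvi : v.testBit i = false :=
      Nat.testBit_lt_two_pow (lt_of_lt_of_le (by omega) hle)
    rw [hvi]
    simp

-- a filtering append loop is List.filter (over a mapped index list)
theorem pvFoldFilter {a : Type} (p : a → Prop) [DecidablePred p] (c : Nat → a) :
    ∀ (l : List Nat) (acc : List a),
      l.foldl (fun acc v => if p (c v) then acc ++ [c v] else acc) acc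
        = acc ++ ((l.filter (fun v => decide (p (c v)))).map c) := by
  intro l
  induction l with
  | nil => intro acc; simp
  | cons x xs ih =>
    intro acc
    rw [List.foldl_cons]
    by_cases hx : p (c x)
    · rw [if_pos hx, ih]
      simp [List.filter_cons, hx]
    · rw [if_neg hx, ih]
      simp [List.filter_cons, hx]

-- A's loop, as a filtered byte list
theorem pvASide (KM fx : Int) (g : Nat → Nat)
    (hband : ∀ v : Nat, PySem.Int.band (v : Int) KM = ((g v : Nat) : Int)) :
    (PySem.List.pyRange 0 256 1).foldl
        (fun acc V => if PySem.Int.band V KM ≠ fx then acc else acc ++ [V]) []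
      = ((List.range 256).filter (fun v => decide (((g v : Nat) : Int) = fx))).map
          (fun v : Nat => (v : Int)) := by
  simp only [ne_eq, ite_not]
  rw [PySem.List.pyRange_one]
  have h256 : ((256 : Int) - 0).toNat = 256 := by decide
  rw [h256, List.foldl_map]
  have := pvFoldFilter (fun z => PySem.Int.band z KM = fx) (fun v => (0 : Int) + (v : Nat))
    (List.range 256) []
  simp only [zero_add] at this ⊢
  rw [this, List.nil_append]
  have hpred2 : (fun v : Nat => decide (PySem.Int.band (v : Int) KM = fx))
      = (fun v : Nat => decide (((g v : Nat) : Int) = fx)) := by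
    funext v; rw [hband]
  rw [hpred2]

-- one iteration of B's loop advances the Nat-level model by one bit
theorem pvStep (KM fx : Int) (mb fb : Nat → Bool)
    (hKM : ∀ i : Nat, (PySem.Int.band KM (((2:Nat)^i : Nat) : Int) ≠ 0) ↔ mb i = true)
    (hfx : ∀ i : Nat, (PySem.Int.band fx (((2:Nat)^i : Nat) : Int) ≠ 0) ↔ fb i = true)
    (k : Nat) :
    (if PySem.Int.band KM (2 ^ ((k : Int)).toNat) ≠ 0 then
      (if PySem.Int.band fx (2 ^ ((k : Int)).toNat) ≠ 0 then
        ((pvBuild mb fb k).map (fun v : Nat => (v : Int))).map (· + 2 ^ ((k : Int)).toNat)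
      else ((pvBuild mb fb k).map (fun v : Nat => (v : Int))))
    else ((pvBuild mb fb k).map (fun v : Nat => (v : Int)))
      ++ ((pvBuild mb fb k).map (fun v : Nat => (v : Int))).map (· + 2 ^ ((k : Int)).toNat))
    = (pvBuild mb fb (k + 1)).map (fun v : Nat => (v : Int)) := by
  have htn : ((k : Int)).toNat = k := Int.toNat_natCast k
  have hpw : ((2:Int) ^ k) = (((2:Nat)^k : Nat) : Int) := by push_cast; ring
  rw [htn]
  have hmap : ((pvBuild mb fb k).map (fun v : Nat => (v : Int))).map (fun z : Int => z + (2:Int) ^ k)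
      = ((pvBuild mb fb k).map (fun v : Nat => v + 2 ^ k)).map (fun v : Nat => (v : Int)) := by
    simp only [List.map_map]
    apply List.map_congr_left
    intro v _
    simp
  by_cases hm : mb k = true
  · rw [if_pos (by rw [hpw]; exact (hKM k).mpr hm)]
    by_cases hf : fb k = true
    · rw [if_pos (by rw [hpw]; exact (hfx k).mpr hf)]
      rw [hmap]
      simp only [pvBuild, hm, hf, if_pos]
    · rw [if_neg (by rw [hpw]; intro hc; exact hf ((hfx k).mp hc))]
      have hf' : fb k = false := by simpa using hf
      simp only [pvBuild, hm, hf', if_pos]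
      simp
  · rw [if_neg (by rw [hpw]; intro hc; exact hm ((hKM k).mp hc))]
    have hm' : mb k = false := by simpa using hm
    rw [hmap]
    simp only [pvBuild, hm', List.map_append]
    simp

-- B's loop over the remaining bit positions
theorem pvFoldB (KM fx : Int) (mb fb : Nat → Bool)
    (hKM : ∀ i : Nat, (PySem.Int.band KM (((2:Nat)^i : Nat) : Int) ≠ 0) ↔ mb i = true)
    (hfx : ∀ i : Nat, (PySem.Int.band fx (((2:Nat)^i : Nat) : Int) ≠ 0) ↔ fb i = true) :
    ∀ (d a : Nat), a + d = 8 →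
      (PySem.List.pyRange (a : Int) 8 1).foldl
          (fun vals i =>
            let bit : Int := 2 ^ i.toNat
            if PySem.Int.band KM bit ≠ 0 then
              (if PySem.Int.band fx bit ≠ 0 then vals.map (· + bit) else vals)
            else vals ++ vals.map (· + bit))
          ((pvBuild mb fb a).map (fun v : Nat => (v : Int)))
        = (pvBuild mb fb 8).map (fun v : Nat => (v : Int)) := by
  intro d
  induction d with
  | zero =>
    intro a ha
    rw [PySem.List.pyRange_one_eq_nil (by omega)]
    simp only [List.foldl_nil]
    rw [show a = 8 by omega]
  | succ d ih =>
    intro a ha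
    rw [PySem.List.pyRange_one_cons (by omega)]
    rw [List.foldl_cons]
    have hcast : ((a : Int) + 1) = ((a + 1 : Nat) : Int) := by push_cast; ring
    simp only []
    rw [pvStep KM fx mb fb hKM hfx a, hcast]
    exact ih (a + 1) (by omega)

-- the common skeleton: A's scan equals B's guarded construction
theorem pvMain (KM fx : Int) (mb : Nat → Bool) (g : Nat → Nat)
    (hband : ∀ v : Nat, PySem.Int.band (v : Int) KM = ((g v : Nat) : Int))
    (hg : ∀ v i, (g v).testBit i = (v.testBit i && mb i))
    (hKM : ∀ i : Nat, (PySem.Int.band KM (((2:Nat)^i : Nat) : Int) ≠ 0) ↔ mb i = true)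
    (hsub : ∀ f : Nat, fx = (f : Int) → ∀ i, f.testBit i = true → mb i = true) :
    (PySem.List.pyRange 0 256 1).foldl
        (fun acc V => if PySem.Int.band V KM ≠ fx then acc else acc ++ [V]) []
      = (if fx < 0 ∨ fx > 255 then ([] : List Int)
         else (PySem.List.pyRange 0 8 1).foldl
          (fun vals i =>
            let bit : Int := 2 ^ i.toNat
            if PySem.Int.band KM bit ≠ 0 then
              (if PySem.Int.band fx bit ≠ 0 then vals.map (· + bit) else vals)
            else vals ++ vals.map (· + bit)) [0]) := by
  rw [pvASide KM fx g hband]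
  rcases lt_trichotomy fx 0 with hneg | h0f
  · rw [if_pos (Or.inl hneg)]
    rw [List.filter_eq_nil_iff.mpr ?_]
    · simp
    · intro v _
      simp only [decide_eq_true_iff]
      intro hc
      have : (0:Int) ≤ ((g v : Nat) : Int) := by positivity
      omega
  · obtain ⟨f, hfx⟩ : ∃ f : Nat, fx = (f : Int) := by
      rcases h0f with h0 | hpos
      · exact ⟨0, by omega⟩
      · exact ⟨fx.toNat, by omega⟩
    subst hfx
    by_cases hbig : (f : Int) > 255
    · rw [if_pos (Or.inr hbig)]
      rw [List.filter_eq_nil_iff.mpr ?_]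
      · simp
      · intro v hv
        simp only [decide_eq_true_iff, Nat.cast_inj]
        intro hc
        have := pvGLt mb g hg v (List.mem_range.mp hv)
        omega
    · rw [if_neg (by push_neg; constructor <;> omega)]
      have hf256 : f < 256 := by omega
      have hfb : ∀ i : Nat, (PySem.Int.band ((f:Nat) : Int) (((2:Nat)^i : Nat) : Int) ≠ 0) ↔ f.testBit i = true := by
        intro i
        rw [PySem.Int.band_natCast, Nat.and_two_pow]
        cases h : f.testBit i with
        | true => simp [Nat.two_pow_pos]
        | false => simp
      have hb := pvFoldB ((KM : Int)) ((f:Nat) : Int) mb (fun i => f.testBit i) hKM hfb 8 0 (by omega)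
      have hinit : (pvBuild mb (fun i => f.testBit i) 0).map (fun v : Nat => (v : Int)) = [0] := by
        simp [pvBuild]
      rw [hinit] at hb
      rw [show ((0:Nat) : Int) = (0 : Int) by simp] at hb
      rw [hb]
      have hpred : (fun v => decide (((g v : Nat) : Int) = ((f : Nat) : Int)))
          = (fun v => decide (g v = f)) := by
        funext v; simp
      rw [hpred, pvCore mb g f hg hf256 (hsub f rfl)]

-- ===== VERDICT (by name: the statement is the Claim_ definition above) =====
theorem BFByte_spec : Claim_equal_BFByte := by
  intro KV KM _
  unfold Spec_BFByte BFByte BFByte_alt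
  by_cases h255 : KM = 255
  · rw [if_pos h255, if_pos h255]
  · rw [if_neg h255, if_neg h255]
    simp only []
    cases KM with
    | ofNat n =>
      refine pvMain (Int.ofNat n) _ (fun i => n.testBit i) (fun v => v &&& n) ?_ ?_ ?_ ?_
      · intro v
        exact PySem.Int.band_natCast v n
      · intro v i
        exact Nat.testBit_land v n i
      · intro i
        rw [show (Int.ofNat n) = ((n : Nat) : Int) from rfl, PySem.Int.band_natCast, Nat.and_two_pow]
        cases h : n.testBit i with
        | true => simp [Nat.two_pow_pos, h]
        | false => simp [h]
      · intro f hfx i hfi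
        cases KV with
        | ofNat x =>
          rw [show (Int.ofNat x) = ((x : Nat) : Int) from rfl,
            show (Int.ofNat n) = ((n : Nat) : Int) from rfl, PySem.Int.band_natCast] at hfx
          have hf : f = x &&& n := by exact_mod_cast hfx.symm
          rw [hf, Nat.testBit_land] at hfi
          exact (Bool.and_eq_true_iff.mp hfi).2
        | negSucc y =>
          rw [show (Int.ofNat n) = ((n : Nat) : Int) from rfl, pvBandNegSuccNat y n] at hfx
          have hf : f = Nat.ldiff n y := by exact_mod_cast hfx.symm
          rw [hf, Nat.testBit_ldiff] at hfi
          exact (Bool.and_eq_true_iff.mp hfi).1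
    | negSucc n =>
      refine pvMain (Int.negSucc n) _ (fun i => !n.testBit i) (fun v => Nat.ldiff v n) ?_ ?_ ?_ ?_
      · intro v
        exact pvBandNatNegSucc v n
      · intro v i
        exact Nat.testBit_ldiff v n i
      · intro i
        rw [pvBandNegSuccNat n (2 ^ i)]
        rw [← pvSubAnd (2 ^ i) n, Nat.land_comm, Nat.and_two_pow]
        cases h : n.testBit i with
        | true => simp [h]
        | false => simp [Nat.two_pow_pos, h]
      · intro f hfx i hfi
        cases KV with
        | ofNat x =>
          rw [show (Int.ofNat x) = ((x : Nat) : Int) from rfl, pvBandNatNegSucc x n] at hfx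
          have hf : f = Nat.ldiff x n := by exact_mod_cast hfx.symm
          rw [hf, Nat.testBit_ldiff] at hfi
          exact (Bool.and_eq_true_iff.mp hfi).2
        | negSucc y =>
          rw [pvBandNegSuccNegSucc y n] at hfx
          exfalso
          have h1 : (0:Int) ≤ ((y ||| n : Nat) : Int) := by positivity
          have h2 : (0:Int) ≤ ((f : Nat) : Int) := by positivity
          omega
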